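-- pv_equiv track=rewrite | github.com/hummingbot/hummingbot | hummingbot/core/data_type/trade_fee.py | _are_tokens_interchangeable
-- ===== SOURCE A (Python) =====
-- def _are_tokens_interchangeable(first_token: str, second_token: str):
--     interchangeable_tokens = [
--         {"WETH", "ETH"},
--         {"WBNB", "BNB"},
--         {"WMATIC", "MATIC"},
--         {"WAVAX", "AVAX"},
--         {"WONE", "ONE"},
--         {"USDC", "USDC.E"},
--         {"WBTC", "BTC"}
--     ]
--     return first_token == second_token or any(({first_token, second_token} <= interchangeable_pair
--                                                for interchangeable_pair
--                                                in interchangeable_tokens))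
-- ===== SOURCE B (Python) =====
-- _NORM = {}
-- for _w, _n in [("WETH", "ETH"), ("WBNB", "BNB"), ("WMATIC", "MATIC"),
--                ("WAVAX", "AVAX"), ("WONE", "ONE"), ("USDC", "USDC.E"),
--                ("WBTC", "BTC")]:
--     _NORM[_w] = _w
--     _NORM[_n] = _w
--
--
-- def _are_tokens_interchangeable(first_token: str, second_token: str):
--     return _NORM.get(first_token, first_token) == _NORM.get(second_token, second_token)
-- ===== Notes on version B (the rewrite author's own statement) =====
-- stated objective: idiomatic
-- what changed: Replaces the per-call scan over a list of sets with subset tests by a precomputed normalization dict mapping each token to its pair's canonical representative, so the call is a single lookup-and-compare.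
import Mathlib
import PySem

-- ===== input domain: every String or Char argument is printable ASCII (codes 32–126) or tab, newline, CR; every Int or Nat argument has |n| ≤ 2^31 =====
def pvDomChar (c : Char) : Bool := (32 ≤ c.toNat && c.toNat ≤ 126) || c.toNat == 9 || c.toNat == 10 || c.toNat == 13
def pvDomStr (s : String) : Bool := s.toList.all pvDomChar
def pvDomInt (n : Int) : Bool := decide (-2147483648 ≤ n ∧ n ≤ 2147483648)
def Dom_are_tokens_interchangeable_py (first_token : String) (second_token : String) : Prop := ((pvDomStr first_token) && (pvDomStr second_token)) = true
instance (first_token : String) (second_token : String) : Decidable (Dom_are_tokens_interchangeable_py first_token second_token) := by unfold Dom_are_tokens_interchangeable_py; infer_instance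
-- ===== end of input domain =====

-- B replaces the per-call scan over pair-sets by a precomputed token->canonical dict and one equality (idiomatic).


-- ===== PORT A =====
-- the hard-coded list A builds locally, hoisted as a named constant (same literal)
def pvInterPairs : List (PySem.Set String) :=
  [PySem.Set.ofList ["WETH", "ETH"],
   PySem.Set.ofList ["WBNB", "BNB"],
   PySem.Set.ofList ["WMATIC", "MATIC"],
   PySem.Set.ofList ["WAVAX", "AVAX"],
   PySem.Set.ofList ["WONE", "ONE"],
   PySem.Set.ofList ["USDC", "USDC.E"],
   PySem.Set.ofList ["WBTC", "BTC"]]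

def are_tokens_interchangeable_py (first_token : String) (second_token : String) : Bool :=
  let interchangeable_tokens := pvInterPairs
  first_token == second_token ||
    interchangeable_tokens.any (fun interchangeable_pair =>
      PySem.Set.issubset (PySem.Set.ofList [first_token, second_token]) interchangeable_pair)

-- ===== PORT B =====
-- module-level table: for each (wrapped, native) pair, both tokens map to the wrapped token
def pvNorm : PySem.Dict String String :=
  ([("WETH", "ETH"), ("WBNB", "BNB"), ("WMATIC", "MATIC"),
    ("WAVAX", "AVAX"), ("WONE", "ONE"), ("USDC", "USDC.E"),
    ("WBTC", "BTC")] : List (String × String)).foldl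
    (fun d p => (d.insert p.1 p.1).insert p.2 p.1) PySem.Dict.empty

def are_tokens_interchangeable_py_alt (first_token : String) (second_token : String) : Bool :=
  pvNorm.getD first_token first_token == pvNorm.getD second_token second_token

-- ===== PRECONDITION & SPEC =====
def Spec_are_tokens_interchangeable_py (first_token : String) (second_token : String) (out : Bool) : Prop := out = are_tokens_interchangeable_py_alt first_token second_token
instance (first_token : String) (second_token : String) (out : Bool) : Decidable (Spec_are_tokens_interchangeable_py first_token second_token out) := by unfold Spec_are_tokens_interchangeable_py; infer_instance

-- ===== CLAIM (what is proved, stated in full; the proofs are below) =====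
def Claim_equal_are_tokens_interchangeable_py : Prop := ∀ (first_token : String) (second_token : String), Dom_are_tokens_interchangeable_py first_token second_token → Spec_are_tokens_interchangeable_py first_token second_token (are_tokens_interchangeable_py first_token second_token)

-- ===== LEMMAS AND PROOFS =====

-- all tokens mentioned in the table, in order
def pvKeys : List String :=
  ["WETH", "ETH", "WBNB", "BNB", "WMATIC", "MATIC", "WAVAX", "AVAX",
   "WONE", "ONE", "USDC", "USDC.E", "WBTC", "BTC"]

theorem pv_both_mem : ∀ f ∈ pvKeys, ∀ s ∈ pvKeys,
    are_tokens_interchangeable_py f s = are_tokens_interchangeable_py_alt f s := by decide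

theorem pv_keys_norm : pvNorm.keys = pvKeys := by decide

theorem pv_canon_mem : ∀ k ∈ pvKeys, pvNorm.getD k k ∈ pvKeys := by decide

theorem pv_pairs_sub : ∀ p ∈ pvInterPairs, ∀ x ∈ p, x ∈ pvKeys := by decide

theorem pv_getD_not_mem (f : String) (hf : f ∉ pvKeys) : pvNorm.getD f f = f := by
  have h : pvNorm.get? f = none := by
    rw [PySem.Dict.get?_eq_none_iff_not_mem_keys, pv_keys_norm]; exact hf
  rw [PySem.Dict.getD_eq_get?_getD, h]; rfl

-- A as a Prop: f = s or some hard-coded pair contains both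
theorem pv_A_iff (f s : String) :
    are_tokens_interchangeable_py f s = true ↔
      f = s ∨ ∃ p ∈ pvInterPairs, f ∈ p ∧ s ∈ p := by
  unfold are_tokens_interchangeable_py
  simp only [Bool.or_eq_true, beq_iff_eq, List.any_eq_true, PySem.Set.issubset_iff,
    PySem.Set.mem_ofList, List.mem_cons, List.not_mem_nil, or_false, forall_eq_or_imp,
    forall_eq]

theorem pv_A_not_mem_left (f s : String) (hf : f ∉ pvKeys) :
    are_tokens_interchangeable_py f s = (f == s) := by
  by_cases hfs : f = s
  · subst hfs
    rw [Bool.eq_iff_iff, pv_A_iff]; simp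
  · have hF : ¬ (f = s ∨ ∃ p ∈ pvInterPairs, f ∈ p ∧ s ∈ p) := by
      rintro (h | ⟨p, hp, h1, _⟩)
      · exact hfs h
      · exact hf (pv_pairs_sub p hp f h1)
    have : are_tokens_interchangeable_py f s = false := by
      rw [← Bool.not_eq_true, pv_A_iff]; exact hF
    rw [this, Eq.comm, beq_eq_false_iff_ne]; exact hfs

theorem pv_A_not_mem_right (f s : String) (hs : s ∉ pvKeys) :
    are_tokens_interchangeable_py f s = (f == s) := by
  by_cases hfs : f = s
  · subst hfs
    rw [Bool.eq_iff_iff, pv_A_iff]; simp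
  · have hF : ¬ (f = s ∨ ∃ p ∈ pvInterPairs, f ∈ p ∧ s ∈ p) := by
      rintro (h | ⟨p, hp, _, h2⟩)
      · exact hfs h
      · exact hs (pv_pairs_sub p hp s h2)
    have : are_tokens_interchangeable_py f s = false := by
      rw [← Bool.not_eq_true, pv_A_iff]; exact hF
    rw [this, Eq.comm, beq_eq_false_iff_ne]; exact hfs

theorem pv_main (f s : String) :
    are_tokens_interchangeable_py f s = are_tokens_interchangeable_py_alt f s := by
  by_cases hf : f ∈ pvKeys
  · by_cases hs : s ∈ pvKeys
    · exact pv_both_mem f hf s hs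
    · -- f in table, s not: both sides are false
      have hfs : f ≠ s := fun h => hs (h ▸ hf)
      rw [pv_A_not_mem_right f s hs]
      unfold are_tokens_interchangeable_py_alt
      rw [pv_getD_not_mem s hs]
      have hcs : pvNorm.getD f f ≠ s := fun h => hs (h ▸ pv_canon_mem f hf)
      rw [beq_eq_false_iff_ne.mpr hfs, beq_eq_false_iff_ne.mpr hcs]
  · rw [pv_A_not_mem_left f s hf]
    unfold are_tokens_interchangeable_py_alt
    rw [pv_getD_not_mem f hf]
    by_cases hs : s ∈ pvKeys
    · have hfs : f ≠ s := fun h => hf (h ▸ hs)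
      have hcs : f ≠ pvNorm.getD s s := fun h => hf (h ▸ pv_canon_mem s hs)
      rw [beq_eq_false_iff_ne.mpr hfs, beq_eq_false_iff_ne.mpr hcs]
    · rw [pv_getD_not_mem s hs]

-- ===== VERDICT (by name: the statement is the Claim_ definition above) =====
theorem are_tokens_interchangeable_py_spec : Claim_equal_are_tokens_interchangeable_py := by
  intro f s _
  unfold Spec_are_tokens_interchangeable_py
  exact pv_main f s
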